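-- pv_equiv track=rewrite | github.com/davekch/aoc24 | day24/solver.py | all_pairings
-- ===== SOURCE A (Python) =====
-- import itertools
--
-- def all_pairings(items):
--     if len(items) % 2 != 0:
--         raise ValueError("The number of elements must be even.")
--
--     if len(items) == 2:
--         return [[items]]
--
--     results = []
--     # take one element and pair it with each other element
--     for pair in itertools.combinations(items, 2):
--         remaining = [i for i in items if i not in pair]
--         for rest in all_pairings(remaining):
--             results.append([list(pair)] + rest)
--     return results
-- ===== SOURCE B (Python) =====
-- import itertools
--
-- def all_pairings(items):
--     if len(items) % 2 != 0:
--         raise ValueError("The number of elements must be even.")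
--     results = []
--     # explicit depth-first worklist of partial states (accumulated pairs, remaining items)
--     stack = [([], items)]
--     while stack:
--         acc, remaining = stack.pop()
--         if len(remaining) == 2:
--             results.append(acc + [remaining])
--         else:
--             # push children in reversed order so the LIFO pop visits them in combinations order
--             for pair in reversed(list(itertools.combinations(remaining, 2))):
--                 stack.append((acc + [list(pair)], [i for i in remaining if i not in pair]))
--     return results
-- ===== Notes on version B (the rewrite author's own statement) =====
-- stated objective: alternative
-- what changed: A's recursion over shrinking lists is replaced by an explicit depth-first worklist (stack) of partial states (accumulated pairs, remaining items), pushing children in reversed combinations order so the LIFO pop reproduces A's output order exactly.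
import Mathlib
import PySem

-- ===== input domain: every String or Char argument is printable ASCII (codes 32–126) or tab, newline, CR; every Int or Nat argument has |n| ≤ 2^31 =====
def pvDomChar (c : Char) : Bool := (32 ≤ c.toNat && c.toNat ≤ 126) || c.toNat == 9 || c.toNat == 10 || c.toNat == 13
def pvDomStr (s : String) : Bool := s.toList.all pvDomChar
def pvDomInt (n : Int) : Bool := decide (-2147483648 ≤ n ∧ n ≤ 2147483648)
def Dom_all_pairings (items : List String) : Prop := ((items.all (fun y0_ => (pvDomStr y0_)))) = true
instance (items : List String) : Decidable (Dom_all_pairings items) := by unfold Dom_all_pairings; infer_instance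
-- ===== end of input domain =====

-- B replaces A's recursion by an explicit depth-first worklist of partial states (alternative
-- decomposition, same combinations-at-every-level strategy and output order).

-- ===== PORT A =====
-- itertools.combinations(l, 2), in itertools order
def combs2 (l : List String) : List (String × String) :=
  match l with
  | [] => []
  | x :: xs => xs.map (fun y => (x, y)) ++ combs2 xs

-- [i for i in items if i not in pair]
def remFilter (l : List String) (p : String × String) : List String :=
  l.filter (fun i => !(i == p.1 || i == p.2))

-- A's recursion, with the list length as a fuel bound for totality (each recursive call's
-- argument is at least 2 shorter, so the fuel never runs out on the calls A actually makes)
def apGo : Nat → List String → List (List (List String))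
  | 0, _ => []
  | fuel + 1, items =>
    if items.length % 2 ≠ 0 then []   -- Python: raise ValueError (excluded by Pre_)
    else if items.length = 2 then [[items]]
    else
      (combs2 items).foldl
        (fun results pair =>
          results ++ (apGo fuel (remFilter items pair)).map (fun rest => [pair.1, pair.2] :: rest))
        []

def all_pairings (items : List String) : List (List (List String)) :=
  apGo items.length items

-- ===== PORT B =====
-- weight used only as a fuel bound for B's while loop (the total number of pops stays below it)
def potB : Nat → Nat
  | 0 => 1
  | 1 => 1
  | n + 2 => 1 + (n + 2) * (n + 2) * potB n

-- the while loop: pop a state, emit or push children (children pushed in reversed order)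
def bLoop : Nat → List (List (List String) × List String) → List (List (List String)) → List (List (List String))
  | 0, _, res => res
  | _ + 1, [], res => res
  | fuel + 1, (acc, remaining) :: stack, res =>
    if remaining.length = 2 then
      bLoop fuel stack (res ++ [acc ++ [remaining]])
    else
      bLoop fuel
        ((combs2 remaining).reverse.foldl
          (fun st pair => (acc ++ [[pair.1, pair.2]], remFilter remaining pair) :: st) stack)
        res

def all_pairings_alt (items : List String) : List (List (List String)) :=
  if items.length % 2 ≠ 0 then []   -- Python: raise ValueError (excluded by Pre_)
  else bLoop (potB items.length) [([], items)] []

-- ===== PRECONDITION & SPEC =====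
-- Pre_ excludes exactly the inputs on which A raises ValueError: odd-length lists (immediate
-- raise), and lists of length ≥ 4 with a duplicate and a value of odd multiplicity, where
-- A's all-occurrence 'not in pair' filter hands a recursive call an odd-length list.
def Pre_all_pairings (items : List String) : Prop :=
  items.length % 2 = 0 ∧
    (items.Nodup ∨ items.length = 2 ∨ ∀ x ∈ items, items.count x % 2 = 0)
instance (items : List String) : Decidable (Pre_all_pairings items) := by
  unfold Pre_all_pairings; infer_instance

def pvWitness_all_pairings : List String := ["a", "b", "c", "d"]

def Spec_all_pairings (items : List String) (out : List (List (List String))) : Prop := out = all_pairings_alt items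
instance (items : List String) (out : List (List (List String))) : Decidable (Spec_all_pairings items out) := by unfold Spec_all_pairings; infer_instance

-- ===== CLAIM (what is proved, stated in full; the proofs are below) =====
def Claim_equal_all_pairings : Prop := ∀ (items : List String), Dom_all_pairings items → Pre_all_pairings items → Spec_all_pairings items (all_pairings items)

-- ===== LEMMAS AND PROOFS =====

theorem potB_pos (n : Nat) : 1 ≤ potB n := by
  induction n using potB.induct <;> simp [potB]

theorem combs2_length_le (l : List String) : (combs2 l).length ≤ l.length * l.length := by
  induction l with
  | nil => simp [combs2]
  | cons x xs ih => simp [combs2]; nlinarith [ih]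

theorem combs2_mem {p : String × String} :
    ∀ {l : List String}, p ∈ combs2 l →
      ∃ l₁ l₂ l₃, l = l₁ ++ (p.1 :: (l₂ ++ (p.2 :: l₃))) := by
  intro l
  induction l with
  | nil => simp [combs2]
  | cons x xs ih =>
    intro hp
    rcases List.mem_append.1 hp with h | h
    · rcases List.mem_map.1 h with ⟨y, hy, hxy⟩
      rcases List.append_of_mem hy with ⟨l₂, l₃, rfl⟩
      exact ⟨[], l₂, l₃, by simp [← hxy]⟩
    · rcases ih h with ⟨l₁, l₂, l₃, rfl⟩
      exact ⟨x :: l₁, l₂, l₃, rfl⟩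

theorem remFilter_length_eq (l : List String) (p : String × String) :
    (remFilter l p).length + List.countP (fun i => (i == p.1 || i == p.2)) l = l.length := by
  have hlen := List.length_eq_countP_add_countP (fun i => (i == p.1 || i == p.2)) (l := l)
  have hfilt : (remFilter l p).length
      = List.countP (fun a => decide ¬((a == p.1 || a == p.2) = true)) l := by
    rw [remFilter, ← List.countP_eq_length_filter]
    exact List.countP_congr (fun a _ => by simp [decide_not])
  omega

theorem remFilter_len_le {l : List String} {p : String × String} (hp : p ∈ combs2 l) :
    (remFilter l p).length + 2 ≤ l.length := by
  rcases combs2_mem hp with ⟨l₁, l₂, l₃, heq⟩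
  have hsub : List.Sublist [p.1, p.2] l := by
    rw [heq]
    refine List.sublist_append_of_sublist_right ?_
    have h1 : List.Sublist [p.1] (p.1 :: l₂) := (List.nil_sublist l₂).cons₂ p.1
    have h2 : List.Sublist [p.2] (p.2 :: l₃) := (List.nil_sublist l₃).cons₂ p.2
    exact List.Sublist.append h1 h2
  have hc : 2 ≤ List.countP (fun i => (i == p.1 || i == p.2)) l := by
    have := List.Sublist.countP_le (p := fun i => (i == p.1 || i == p.2)) hsub
    simpa using this
  have := remFilter_length_eq l p
  omega

theorem combs2_mem_fst {l : List String} {p : String × String} (hp : p ∈ combs2 l) :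
    p.1 ∈ l ∧ p.2 ∈ l := by
  rcases combs2_mem hp with ⟨l₁, l₂, l₃, rfl⟩
  constructor <;> simp

theorem countP_pair {l : List String} {a b : String} (h : a ≠ b) :
    List.countP (fun i => (i == a || i == b)) l = l.count a + l.count b := by
  induction l with
  | nil => simp
  | cons x xs ih =>
    rw [List.countP_cons, List.count_cons, List.count_cons, ih]
    by_cases hxa : x = a <;> by_cases hxb : x = b <;> simp [hxa, hxb, h, Ne.symm h] <;> omega

theorem countP_pair_eq (l : List String) (a : String) :
    List.countP (fun i => (i == a || i == a)) l = l.count a := by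
  rw [List.count_eq_countP]
  exact List.countP_congr (fun x _ => by simp)

-- with every multiplicity even, removing all occurrences of the two chosen values keeps the
-- length even and all remaining multiplicities even
theorem remFilter_even {l : List String} {p : String × String}
    (hev : ∀ x ∈ l, l.count x % 2 = 0) (hp : p ∈ combs2 l) :
    (remFilter l p).length % 2 = (l.length % 2)
      ∧ ∀ x ∈ remFilter l p, (remFilter l p).count x % 2 = 0 := by
  have hmem := combs2_mem_fst hp
  have hcp : List.countP (fun i => (i == p.1 || i == p.2)) l % 2 = 0 := by
    by_cases hpp : p.1 = p.2
    · have : List.countP (fun i => (i == p.1 || i == p.2)) l = l.count p.1 := by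
        rw [show p.2 = p.1 from hpp.symm]; exact countP_pair_eq l p.1
      rw [this]; exact hev p.1 hmem.1
    · rw [countP_pair hpp]
      have h1 := hev p.1 hmem.1
      have h2 := hev p.2 hmem.2
      omega
  constructor
  · have := remFilter_length_eq l p
    omega
  · intro x hx
    obtain ⟨hxl, hpred⟩ :=
      List.mem_filter.1 (show x ∈ l.filter (fun i => !(i == p.1 || i == p.2)) from hx)
    have hcount : (remFilter l p).count x = l.count x := by
      rw [remFilter]; exact List.count_filter hpred
    rw [hcount]
    exact hev x hxl

theorem potB_succ_le : ∀ n, potB n ≤ potB (n + 1) := by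
  intro n
  induction n using Nat.strong_induction_on with
  | _ n ih =>
    match n with
    | 0 => simp [potB]
    | 1 => simp [potB]
    | m + 2 =>
      have h1 : potB (m + 2) = 1 + (m + 2) * (m + 2) * potB m := rfl
      have h2 : potB (m + 3) = 1 + (m + 3) * (m + 3) * potB (m + 1) := rfl
      have h3 := ih m (by omega)
      rw [h1, h2]
      nlinarith [potB_pos m]

theorem potB_mono {m n : Nat} (h : m ≤ n) : potB m ≤ potB n := by
  induction n with
  | zero => simp [Nat.le_zero.1 h]
  | succ k ih =>
    rcases Nat.lt_or_ge m (k + 1) with hlt | hge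
    · exact le_trans (ih (by omega)) (potB_succ_le k)
    · have : m = k + 1 := by omega
      rw [this]

theorem remFilter_split_nodup {l l₁ l₂ l₃ : List String} {p : String × String}
    (hnd : l.Nodup) (heq : l = l₁ ++ (p.1 :: (l₂ ++ (p.2 :: l₃)))) :
    remFilter l p = l₁ ++ l₂ ++ l₃ := by
  subst heq
  obtain ⟨n1, n2, d1⟩ := List.nodup_append.1 hnd
  obtain ⟨hp1, n3⟩ := List.nodup_cons.1 n2
  obtain ⟨n4, n5, d2⟩ := List.nodup_append.1 n3
  obtain ⟨hp2, -⟩ := List.nodup_cons.1 n5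
  have e1 : ∀ x ∈ l₁, x ≠ p.1 ∧ x ≠ p.2 := fun x hx =>
    ⟨d1 x hx p.1 (by simp), d1 x hx p.2 (by simp)⟩
  have e2 : ∀ x ∈ l₂, x ≠ p.1 ∧ x ≠ p.2 := fun x hx =>
    ⟨fun h => hp1 (List.mem_append_left _ (h ▸ hx)), d2 x hx p.2 (by simp)⟩
  have e3 : ∀ x ∈ l₃, x ≠ p.1 ∧ x ≠ p.2 := fun x hx =>
    ⟨fun h => hp1 (List.mem_append_right _ (by simp [h ▸ hx])), fun h => hp2 (h ▸ hx)⟩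
  have f : ∀ (m : List String), (∀ x ∈ m, x ≠ p.1 ∧ x ≠ p.2) →
      m.filter (fun i => !(i == p.1) && !(i == p.2)) = m := fun m hm =>
    List.filter_eq_self.2 (fun x hx => by simp [(hm x hx).1, (hm x hx).2])
  simp only [remFilter, List.filter_append, List.filter_cons]
  simp [f l₁ e1, f l₂ e2, f l₃ e3]

theorem remFilter_len_nodup {l : List String} {p : String × String}
    (hnd : l.Nodup) (hp : p ∈ combs2 l) :
    (remFilter l p).length + 2 = l.length := by
  rcases combs2_mem hp with ⟨l₁, l₂, l₃, heq⟩
  rw [remFilter_split_nodup hnd heq, heq]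
  simp
  omega

-- A's fuel never matters once it is at least the list length
theorem apGo_congr : ∀ (n : Nat), ∀ {l : List String}, l.length = n →
    ∀ {f₁ f₂ : Nat}, n ≤ f₁ → n ≤ f₂ → apGo f₁ l = apGo f₂ l := by
  intro n
  induction n using Nat.strong_induction_on with
  | _ n ih =>
    intro l hl f₁ f₂ h₁ h₂
    match f₁, f₂ with
    | 0, 0 => rfl
    | 0, g₂ + 1 =>
      have : l = [] := List.eq_nil_of_length_eq_zero (by omega)
      subst this; simp [apGo, combs2]
    | g₁ + 1, 0 =>
      have : l = [] := List.eq_nil_of_length_eq_zero (by omega)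
      subst this; simp [apGo, combs2]
    | g₁ + 1, g₂ + 1 =>
      simp only [apGo]
      by_cases hm : l.length % 2 ≠ 0
      · simp [hm]
      · rw [if_neg hm, if_neg hm]
        by_cases h2 : l.length = 2
        · simp [h2]
        · rw [if_neg h2, if_neg h2]
          refine PySem.List.foldl_congr_mem _ _ _ _ (fun acc p hp => ?_)
          have hle := remFilter_len_le hp
          have hrec : apGo g₁ (remFilter l p) = apGo g₂ (remFilter l p) := by
            rcases Nat.eq_zero_or_pos l.length with h0 | hpos
            · exfalso
              have : l = [] := List.eq_nil_of_length_eq_zero h0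
              subst this; simp [combs2] at hp
            · exact ih (remFilter l p).length (by omega) rfl (by omega) (by omega)
          rw [hrec]

theorem apGo_len (l : List String) : apGo l.length l = all_pairings l := rfl

-- one unfolding of A on a non-base list, in flatMap form
theorem AP_step {l : List String} (hmod : l.length % 2 = 0) (h2 : l.length ≠ 2) :
    all_pairings l =
      (combs2 l).flatMap
        (fun p => (all_pairings (remFilter l p)).map (fun rest => [p.1, p.2] :: rest)) := by
  match hn : l.length with
  | 0 =>
    have : l = [] := List.eq_nil_of_length_eq_zero hn
    subst this; simp [all_pairings, apGo, combs2]
  | n + 1 =>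
    have : all_pairings l = apGo (n + 1) l := by rw [all_pairings, hn]
    rw [this]
    simp only [apGo]
    rw [if_neg (by rw [hn] at hmod; omega), if_neg (by omega)]
    rw [PySem.List.foldl_append_eq_flatMap]
    rw [List.nil_append]
    rw [List.flatMap_def, List.flatMap_def]
    congr 1
    refine List.map_congr_left (fun p hp => ?_)
    have hle := remFilter_len_le hp
    have heq : apGo n (remFilter l p) = all_pairings (remFilter l p) := by
      rw [← apGo_len]
      exact apGo_congr (remFilter l p).length rfl (by omega) (le_refl _)
    rw [heq]

theorem rev_foldl_cons (l : List (String × String))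
    (f : String × String → List (List String) × List String)
    (st : List (List (List String) × List String)) :
    l.reverse.foldl (fun s x => f x :: s) st = l.map f ++ st := by
  rw [List.foldl_reverse]
  induction l with
  | nil => rfl
  | cons x xs ih => simp [ih]

-- the worklist loop, on well-formed states with enough fuel, appends exactly what A computes
-- for each state
theorem bLoop_spec : ∀ (fuel : Nat) (stack : List (List (List String) × List String))
    (res : List (List (List String))),
    (∀ s ∈ stack, (s.2.Nodup ∨ ∀ x ∈ s.2, s.2.count x % 2 = 0) ∧ s.2.length % 2 = 0) →
    (stack.map (fun s => potB s.2.length)).sum ≤ fuel →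
    bLoop fuel stack res =
      res ++ (stack.map (fun s => (all_pairings s.2).map (fun r => s.1 ++ r))).flatten := by
  intro fuel
  induction fuel with
  | zero =>
    intro stack res hinv hsum
    match stack with
    | [] => simp [bLoop]
    | s :: st =>
      exfalso
      have := potB_pos s.2.length
      simp [List.sum_cons] at hsum
      omega
  | succ fuel ih =>
    intro stack res hinv hsum
    match stack with
    | [] => simp [bLoop]
    | (acc, rem) :: st =>
      have hrem := hinv (acc, rem) (List.mem_cons_self)
      have hrem1 : rem.Nodup ∨ ∀ x ∈ rem, rem.count x % 2 = 0 := hrem.1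
      have hrem2 : rem.length % 2 = 0 := hrem.2
      simp only [List.map_cons, List.sum_cons] at hsum
      by_cases h2 : rem.length = 2
      · rw [bLoop, if_pos h2]
        rw [ih st (res ++ [acc ++ [rem]]) (fun s hs => hinv s (List.mem_cons_of_mem _ hs))
            (by have := potB_pos rem.length; omega)]
        have hap : all_pairings rem = [[rem]] := by
          rw [all_pairings, h2]
          simp [apGo, h2]
        simp [hap, List.append_assoc]
      · rw [bLoop, if_neg h2, rev_foldl_cons]
        -- facts about each child state
        have hchild : ∀ p ∈ combs2 rem,
            ((remFilter rem p).Nodup ∨ ∀ x ∈ remFilter rem p, (remFilter rem p).count x % 2 = 0)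
              ∧ (remFilter rem p).length + 2 ≤ rem.length
              ∧ (remFilter rem p).length % 2 = 0 := by
          intro p hp
          rcases hrem1 with hnd | hev
          · have hlen := remFilter_len_nodup hnd hp
            exact ⟨Or.inl (hnd.filter _), by omega, by omega⟩
          · have h := remFilter_even hev hp
            exact ⟨Or.inr h.2, remFilter_len_le hp, by omega⟩
        rw [ih _ res ?inv ?sum]
        case inv =>
          intro s hs
          rcases List.mem_append.1 hs with hs | hs
          · rcases List.mem_map.1 hs with ⟨p, hp, rfl⟩
            have hc := hchild p hp
            exact ⟨hc.1, hc.2.2⟩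
          · exact hinv s (List.mem_cons_of_mem _ hs)
        case sum =>
          rw [List.map_append, List.sum_append, List.map_map]
          have hb : ((combs2 rem).map
              ((fun s => potB s.2.length) ∘ fun pair => (acc ++ [[pair.1, pair.2]], remFilter rem pair))).sum
              ≤ (combs2 rem).length * potB (rem.length - 2) := by
            have := List.sum_le_card_nsmul
              ((combs2 rem).map
                ((fun s => potB s.2.length) ∘ fun pair => (acc ++ [[pair.1, pair.2]], remFilter rem pair)))
              (potB (rem.length - 2))
              (by
                intro x hx
                rcases List.mem_map.1 hx with ⟨p, hp, rfl⟩
                have hle := (hchild p hp).2.1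
                simp only [Function.comp]
                exact potB_mono (by omega))
            simpa [smul_eq_mul, Nat.mul_comm] using this
          have hcnt := combs2_length_le rem
          match hn : rem.length with
          | 0 =>
            have : rem = [] := List.eq_nil_of_length_eq_zero hn
            subst this
            have h1 : potB (List.length ([] : List String)) = 1 := rfl
            simp [combs2]
            omega
          | 1 => exact absurd hrem2 (by omega)
          | m + 2 =>
            have hpot : potB (m + 2) = 1 + (m + 2) * (m + 2) * potB m := rfl
            rw [hn] at hb hcnt hsum
            have hm2 : (m + 2) - 2 = m := by omega
            rw [hm2] at hb
            nlinarith [hb, hcnt, potB_pos m]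
        -- now rewrite the right-hand side
        rw [List.map_append, List.flatten_append, List.map_map]
        have hhead :
            (((combs2 rem).map
              ((fun s => (all_pairings s.2).map (fun r => s.1 ++ r)) ∘
                fun pair => (acc ++ [[pair.1, pair.2]], remFilter rem pair))).flatten)
            = (all_pairings rem).map (fun r => acc ++ r) := by
          rw [AP_step hrem.2 h2, List.map_flatMap, List.flatMap_def]
          congr 1
          refine List.map_congr_left (fun p hp => ?_)
          simp [Function.comp, List.map_map, Function.comp_def]
        rw [hhead]
        simp [List.map_cons, List.flatten_cons]

-- ===== VERDICT (by name: the statement is the Claim_ definition above) =====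
theorem all_pairings_main {items : List String} (hmod : items.length % 2 = 0)
    (hinv : items.Nodup ∨ ∀ x ∈ items, items.count x % 2 = 0) :
    all_pairings items = all_pairings_alt items := by
  unfold all_pairings_alt
  rw [if_neg (by simp [hmod])]
  rw [bLoop_spec (potB items.length) [([], items)] []
      (by intro s hs; simp at hs; subst hs; exact ⟨hinv, hmod⟩)
      (by simp)]
  simp

theorem all_pairings_spec : Claim_equal_all_pairings := by
  intro items _hdom hpre
  obtain ⟨hmod, hnd | h2 | hev⟩ := hpre
  · exact all_pairings_main hmod (Or.inl hnd)
  · obtain ⟨a, b, rfl⟩ := List.length_eq_two.1 h2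
    rfl
  · exact all_pairings_main hmod (Or.inr hev)
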